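-- pv_equiv track=rewrite | github.com/devtooligan/bsa | bsa/detectors/reentrancy.py | _check_reentrancy_in_blocks
-- ===== SOURCE A (Python) =====
-- def _check_reentrancy_in_blocks(basic_blocks, state_vars):
--     """
--     Check for reentrancy in SSA basic blocks format.
--
--     Args:
--         basic_blocks (list): List of basic block dictionaries
--         state_vars (list): List of state variables
--
--     Returns:
--         bool: True if reentrancy is detected
--     """
--     # With the new block splitting, external calls and state writes will be in separate blocks
--     # First, we need to find blocks that have external calls
--     call_blocks = []
--     state_write_blocks = []
--
--     # Identify blocks with calls and blocks with state writes
--     for i, block in enumerate(basic_blocks):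
--         # Get all SSA statements in this block
--         statements = block.get("ssa_statements", [])
--
--         has_external_call = False
--         has_state_write = False
--
--         # Check for external calls
--         for stmt in statements:
--             if "call[external]" in stmt or "call[low_level_external]" in stmt or "call[delegatecall]" in stmt or "call[staticcall]" in stmt:
--                 has_external_call = True
--                 break
--
--         # Check for state variable writes
--         for stmt in statements:
--             for state_var in state_vars:
--                 var_name = state_var["name"]
--                 # Check for pattern like "x_1 = " which represents writing to state var x
--                 if f"{var_name}_" in stmt and " = " in stmt:
--                     has_state_write = True
--                     break
--             if has_state_write:
--                 break
--
--         # Record the results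
--         if has_external_call:
--             call_blocks.append(i)
--         if has_state_write:
--             state_write_blocks.append(i)
--
--     # Now check if any state write block comes after a call block
--     # (blocks are ordered sequentially due to our splitting)
--     for call_block_idx in call_blocks:
--         for write_block_idx in state_write_blocks:
--             if write_block_idx > call_block_idx:
--                 return True
--
--     return False
-- ===== SOURCE B (Python) =====
-- def _check_reentrancy_in_blocks(basic_blocks, state_vars):
--     """Single ordered pass: flag once an external call is seen; report a state
--     write in any strictly later block."""
--     call_pats = ("call[external]", "call[low_level_external]",
--                  "call[delegatecall]", "call[staticcall]")
--     seen_call = False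
--     for block in basic_blocks:
--         stmts = block.get("ssa_statements", [])
--         has_write = any(any(sv["name"] + "_" in s and " = " in s
--                             for sv in state_vars) for s in stmts)
--         if seen_call and has_write:
--             return True
--         if any(c in s for s in stmts for c in call_pats):
--             seen_call = True
--     return False
-- ===== Notes on version B (the rewrite author's own statement) =====
-- stated objective: simpler
-- what changed: Replaced A's two-pass design (collect call-block and write-block index lists, then a nested loop comparing indices) by a single ordered pass over the blocks keeping one seen_call boolean, checking each block for a state write before flagging its call so a same-block call+write does not trigger, and returning True at the first write after a call.
import Mathlib
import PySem

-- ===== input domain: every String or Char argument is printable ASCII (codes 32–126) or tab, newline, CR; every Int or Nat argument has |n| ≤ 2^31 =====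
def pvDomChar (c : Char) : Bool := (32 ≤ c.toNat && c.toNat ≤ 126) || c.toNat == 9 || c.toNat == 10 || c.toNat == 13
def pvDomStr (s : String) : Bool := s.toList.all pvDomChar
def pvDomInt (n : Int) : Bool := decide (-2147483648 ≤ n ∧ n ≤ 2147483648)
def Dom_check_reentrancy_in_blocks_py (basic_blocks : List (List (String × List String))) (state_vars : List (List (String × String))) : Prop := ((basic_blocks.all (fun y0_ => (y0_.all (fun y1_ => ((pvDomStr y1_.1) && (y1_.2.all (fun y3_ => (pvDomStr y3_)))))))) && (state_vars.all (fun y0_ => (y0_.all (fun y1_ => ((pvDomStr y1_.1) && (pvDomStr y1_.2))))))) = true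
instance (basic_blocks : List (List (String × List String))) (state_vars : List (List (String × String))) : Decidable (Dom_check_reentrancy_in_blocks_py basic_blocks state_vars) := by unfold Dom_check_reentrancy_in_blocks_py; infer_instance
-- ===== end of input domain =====

-- B replaces A's two index lists plus nested index-comparison loop by one ordered pass with a
-- seen_call boolean (simpler, single pass; patterns precomputed once).

-- ===== PORT A =====
-- state_var["name"]: under Pre_ the key is present, so getD with default "" is exact
def pvNamePat (sv : List (String × String)) : List Char :=
  ((PySem.Dict.mk sv).getD "name" "").toList ++ ['_']

def pvHasCallA (stmts : List String) : Bool :=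
  stmts.any fun s =>
    PySem.Chars.isIn "call[external]".toList s.toList ||
    PySem.Chars.isIn "call[low_level_external]".toList s.toList ||
    PySem.Chars.isIn "call[delegatecall]".toList s.toList ||
    PySem.Chars.isIn "call[staticcall]".toList s.toList

def pvHasWriteA (state_vars : List (List (String × String))) (stmts : List String) : Bool :=
  stmts.any fun s => state_vars.any fun sv =>
    PySem.Chars.isIn (pvNamePat sv) s.toList && PySem.Chars.isIn " = ".toList s.toList

def pvScanA (state_vars : List (List (String × String))) :
    List (List (String × List String)) → Nat → List Nat → List Nat → List Nat × List Nat
  | [], _, cs, ws => (cs, ws)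
  | b :: rest, i, cs, ws =>
    let stmts := (PySem.Dict.mk b).getD "ssa_statements" []
    pvScanA state_vars rest (i + 1)
      (if pvHasCallA stmts then cs ++ [i] else cs)
      (if pvHasWriteA state_vars stmts then ws ++ [i] else ws)

def check_reentrancy_in_blocks_py (basic_blocks : List (List (String × List String))) (state_vars : List (List (String × String))) : Bool :=
  let p := pvScanA state_vars basic_blocks 0 [] []
  p.1.any fun c => p.2.any fun w => decide (c < w)

-- ===== PORT B =====
def pvCallPats : List (List Char) :=
  ["call[external]".toList, "call[low_level_external]".toList,
   "call[delegatecall]".toList, "call[staticcall]".toList]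

def pvGoB (state_vars : List (List (String × String))) :
    List (List (String × List String)) → Bool → Bool
  | [], _ => false
  | b :: rest, seen =>
    let stmts := (PySem.Dict.mk b).getD "ssa_statements" []
    let has_write := stmts.any fun s => state_vars.any fun sv =>
      PySem.Chars.isIn (((PySem.Dict.mk sv).getD "name" "").toList ++ ['_']) s.toList &&
        PySem.Chars.isIn " = ".toList s.toList
    if seen && has_write then true
    else pvGoB state_vars rest
      (seen || stmts.any fun s => pvCallPats.any fun c => PySem.Chars.isIn c s.toList)

def check_reentrancy_in_blocks_py_alt (basic_blocks : List (List (String × List String))) (state_vars : List (List (String × String))) : Bool :=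
  pvGoB state_vars basic_blocks false

-- ===== PRECONDITION & SPEC =====
-- Pre_ is exactly where Python A returns: A raises KeyError iff some state-variable dict lacks the
-- key "name" AND some block's first SSA statement is not a write of a state variable listed before
-- the first such malformed entry (only then does the scan reach the malformed dict).
def Pre_check_reentrancy_in_blocks_py (basic_blocks : List (List (String × List String))) (state_vars : List (List (String × String))) : Prop :=
  (∀ sv ∈ state_vars, (PySem.Dict.mk sv).contains "name" = true) ∨
  (∀ b ∈ basic_blocks, ∀ s ∈ ((PySem.Dict.mk b).getD "ssa_statements" []).take 1,
    ((state_vars.takeWhile fun sv => (PySem.Dict.mk sv).contains "name").any fun sv =>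
      PySem.Chars.isIn (pvNamePat sv) s.toList && PySem.Chars.isIn " = ".toList s.toList) = true)
instance (basic_blocks : List (List (String × List String))) (state_vars : List (List (String × String))) : Decidable (Pre_check_reentrancy_in_blocks_py basic_blocks state_vars) := by unfold Pre_check_reentrancy_in_blocks_py; infer_instance

def pvWitness_check_reentrancy_in_blocks_py : (List (List (String × List String))) × (List (List (String × String))) :=
  ([[("ssa_statements", ["call[external] f()"])], [("ssa_statements", ["x_1 = 2"])]], [[("name", "x")]])

def Spec_check_reentrancy_in_blocks_py (basic_blocks : List (List (String × List String))) (state_vars : List (List (String × String))) (out : Bool) : Prop := out = check_reentrancy_in_blocks_py_alt basic_blocks state_vars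
instance (basic_blocks : List (List (String × List String))) (state_vars : List (List (String × String))) (out : Bool) : Decidable (Spec_check_reentrancy_in_blocks_py basic_blocks state_vars out) := by unfold Spec_check_reentrancy_in_blocks_py; infer_instance

-- ===== CLAIM (what is proved, stated in full; the proofs are below) =====
def Claim_equal_check_reentrancy_in_blocks_py : Prop := ∀ (basic_blocks : List (List (String × List String))) (state_vars : List (List (String × String))), Dom_check_reentrancy_in_blocks_py basic_blocks state_vars → Pre_check_reentrancy_in_blocks_py basic_blocks state_vars → Spec_check_reentrancy_in_blocks_py basic_blocks state_vars (check_reentrancy_in_blocks_py basic_blocks state_vars)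

-- ===== LEMMAS AND PROOFS =====

def pvAnyPair (cs ws : List Nat) : Bool := cs.any fun c => ws.any fun w => decide (c < w)

theorem pvAny_of_all_true {l : List Nat} {p : Nat → Bool} (h : ∀ x ∈ l, p x = true) :
    l.any p = !l.isEmpty := by
  cases l with
  | nil => rfl
  | cons a t => simp [h a (by simp)]

theorem pvAny_or (l : List Nat) (p q : Nat → Bool) :
    (l.any fun x => p x || q x) = (l.any p || l.any q) := by
  induction l with
  | nil => rfl
  | cons a t ih => simp [List.any_cons, ih, Bool.or_assoc, Bool.or_left_comm]

theorem pvAnyPair_snoc_right (cs ws : List Nat) (i : Nat) :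
    pvAnyPair cs (ws ++ [i]) = (pvAnyPair cs ws || cs.any fun c => decide (c < i)) := by
  simp only [pvAnyPair, List.any_append, List.any_cons, List.any_nil, Bool.or_false]
  rw [pvAny_or]

theorem pvAnyPair_snoc_left (cs ws : List Nat) (i : Nat) :
    pvAnyPair (cs ++ [i]) ws = (pvAnyPair cs ws || ws.any fun w => decide (i < w)) := by
  simp [pvAnyPair, List.any_append]

-- B's inline per-block write test is A's nested state_vars scan (same expression)
theorem pvWrite_eq (svs : List (List (String × String))) (stmts : List String) :
    (stmts.any fun s => svs.any fun sv =>
        PySem.Chars.isIn (((PySem.Dict.mk sv).getD "name" "").toList ++ ['_']) s.toList &&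
          PySem.Chars.isIn " = ".toList s.toList)
      = pvHasWriteA svs stmts := rfl

-- B's per-block call test over the pattern list is A's four-way disjunction
theorem pvCall_eq (stmts : List String) :
    (stmts.any fun s => pvCallPats.any fun c => PySem.Chars.isIn c s.toList)
      = pvHasCallA stmts := by
  simp [pvHasCallA, pvCallPats, Bool.or_assoc]

theorem pvMain (svs : List (List (String × String)))
    (blocks : List (List (String × List String))) :
    ∀ (i : Nat) (cs ws : List Nat), (∀ c ∈ cs, c < i) → (∀ w ∈ ws, w < i) →
      pvAnyPair (pvScanA svs blocks i cs ws).1 (pvScanA svs blocks i cs ws).2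
        = (pvAnyPair cs ws || pvGoB svs blocks (!cs.isEmpty)) := by
  induction blocks with
  | nil => intro i cs ws _ _; simp [pvScanA, pvGoB]
  | cons b rest ih =>
    intro i cs ws hc hw
    have hcs : cs.any (fun c => decide (c < i)) = !cs.isEmpty :=
      pvAny_of_all_true (by intro x hx; simpa using hc x hx)
    have hws : ws.any (fun w => decide (i < w)) = false := by
      simp only [List.any_eq_false]; intro w hwm; simpa using Nat.le_of_lt (hw w hwm)
    have hc' : ∀ c ∈ cs ++ [i], c < i + 1 := by
      intro c hcm; rcases List.mem_append.1 hcm with h | h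
      · exact Nat.lt_succ_of_lt (hc c h)
      · simp at h; omega
    have hw' : ∀ w ∈ ws ++ [i], w < i + 1 := by
      intro w hwm; rcases List.mem_append.1 hwm with h | h
      · exact Nat.lt_succ_of_lt (hw w h)
      · simp at h; omega
    have hcup : ∀ c ∈ cs, c < i + 1 := fun c h => Nat.lt_succ_of_lt (hc c h)
    have hwup : ∀ w ∈ ws, w < i + 1 := fun w h => Nat.lt_succ_of_lt (hw w h)
    have hne : ∀ j : Nat, (cs ++ [j]).isEmpty = false := by intro j; cases cs <;> rfl
    rw [pvScanA, pvGoB, pvWrite_eq, pvCall_eq]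
    cases hW : pvHasWriteA svs ((PySem.Dict.mk b).getD "ssa_statements" []) <;>
      cases hC : pvHasCallA ((PySem.Dict.mk b).getD "ssa_statements" []) <;>
        simp only [if_true, if_false, Bool.false_eq_true]
    · rw [ih (i + 1) cs ws hcup hwup]; simp
    · rw [ih (i + 1) (cs ++ [i]) ws hc' hwup]
      simp [pvAnyPair_snoc_left, hws, hne]
    · rw [ih (i + 1) cs (ws ++ [i]) hcup hw']
      simp only [pvAnyPair_snoc_right, hcs, Bool.or_assoc]
      cases cs.isEmpty <;> cases pvAnyPair cs ws <;>
        cases pvGoB svs rest false <;> simp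
    · rw [ih (i + 1) (cs ++ [i]) (ws ++ [i]) hc' hw']
      simp only [pvAnyPair_snoc_left, pvAnyPair_snoc_right, hcs, hws, List.any_append,
        List.any_cons, List.any_nil, hne]
      cases cs.isEmpty <;> cases pvAnyPair cs ws <;>
        cases pvGoB svs rest true <;> simp

-- ===== VERDICT (by name: the statement is the Claim_ definition above) =====
theorem check_reentrancy_in_blocks_py_spec : Claim_equal_check_reentrancy_in_blocks_py := by
  intro bbs svs _ _
  unfold Spec_check_reentrancy_in_blocks_py check_reentrancy_in_blocks_py check_reentrancy_in_blocks_py_alt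
  have := pvMain svs bbs 0 [] [] (by simp) (by simp)
  simpa [pvAnyPair] using this
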